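-- pv_equiv track=rewrite | github.com/ckf42/AOC | 2024/day2.py | isSafeRow
-- ===== SOURCE A (Python) =====
-- def isSafeRow(row):
--     n = len(row)
--     incFail = False
--     decFail = False
--     for i in range(1, n):
--         if row[i] - row[i - 1] not in range(1, 4):
--             incFail = True
--         if row[i - 1] - row[i] not in range(1, 4):
--             decFail = True
--         if incFail and decFail:
--             return False
--     return True
-- ===== SOURCE B (Python) =====
-- def isSafeRow(row):
--     if len(row) < 2:
--         return True
--     sign = 1 if row[1] > row[0] else -1
--     prev = row[0]
--     for x in row[1:]:
--         if not (1 <= sign * (x - prev) <= 3):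
--             return False
--         prev = x
--     return True
-- ===== Notes on version B (the rewrite author's own statement) =====
-- stated objective: simpler
-- what changed: Instead of tracking two sticky failure flags for both directions simultaneously, B decides the direction once from the sign of the first pair and then does a single-predicate pass checking 1 <= sign*(x-prev) <= 3.
import Mathlib
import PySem

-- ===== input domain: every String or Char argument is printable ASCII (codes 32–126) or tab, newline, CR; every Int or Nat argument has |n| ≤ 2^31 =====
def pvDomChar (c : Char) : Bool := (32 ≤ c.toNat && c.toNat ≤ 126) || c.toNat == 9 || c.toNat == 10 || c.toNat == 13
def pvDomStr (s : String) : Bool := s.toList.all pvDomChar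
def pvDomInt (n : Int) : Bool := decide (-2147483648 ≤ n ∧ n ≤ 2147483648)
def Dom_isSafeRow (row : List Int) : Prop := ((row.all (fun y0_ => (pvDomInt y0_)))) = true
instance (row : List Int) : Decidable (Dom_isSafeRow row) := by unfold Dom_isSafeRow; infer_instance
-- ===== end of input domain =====

-- B replaces A's dual sticky-flag loop (which tracks failure of both directions at once)
-- by committing to one direction from the sign of the first pair and checking a single predicate (simpler).

-- ===== PORT A =====
-- the for-loop over range(1, n) with sticky incFail/decFail flags and early return
-- (indices produced by range(1, n) are always in range, so pyGetD with default 0 is exact here)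
def isSafeRowLoop (row : List Int) (idxs : List Int) (incFail decFail : Bool) : Bool :=
  match idxs with
  | [] => true
  | i :: rest =>
    let incFail := if ¬(1 ≤ PySem.List.pyGetD row i 0 - PySem.List.pyGetD row (i - 1) 0 ∧
                        PySem.List.pyGetD row i 0 - PySem.List.pyGetD row (i - 1) 0 < 4) then true else incFail
    let decFail := if ¬(1 ≤ PySem.List.pyGetD row (i - 1) 0 - PySem.List.pyGetD row i 0 ∧
                        PySem.List.pyGetD row (i - 1) 0 - PySem.List.pyGetD row i 0 < 4) then true else decFail
    if incFail && decFail then false else isSafeRowLoop row rest incFail decFail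

def isSafeRow (row : List Int) : Bool :=
  isSafeRowLoop row (PySem.List.pyRange 1 (row.length : Int) 1) false false

-- ===== PORT B =====
-- the `for x in row[1:]` loop with accumulator prev and early return
def altLoop (sign : Int) (prev : Int) (xs : List Int) : Bool :=
  match xs with
  | [] => true
  | x :: rest =>
    if ¬(1 ≤ sign * (x - prev) ∧ sign * (x - prev) ≤ 3) then false
    else altLoop sign x rest

def isSafeRow_alt (row : List Int) : Bool :=
  if _h : row.length < 2 then true
  else
    let a := PySem.List.pyGetD row 0 0
    let b := PySem.List.pyGetD row 1 0
    let sign : Int := if a < b then 1 else -1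
    altLoop sign a (row.drop 1)

-- ===== PRECONDITION & SPEC =====
def Spec_isSafeRow (row : List Int) (out : Bool) : Prop := out = isSafeRow_alt row
instance (row : List Int) (out : Bool) : Decidable (Spec_isSafeRow row out) := by unfold Spec_isSafeRow; infer_instance

-- ===== CLAIM (what is proved, stated in full; the proofs are below) =====
def Claim_equal_isSafeRow : Prop := ∀ (row : List Int), Dom_isSafeRow row → Spec_isSafeRow row (isSafeRow row)

-- ===== LEMMAS AND PROOFS =====

-- A's loop replayed on the list of adjacent differences instead of on indices
def dLoop (ds : List Int) (incFail decFail : Bool) : Bool :=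
  match ds with
  | [] => true
  | d :: rest =>
    let incFail := if ¬(1 ≤ d ∧ d < 4) then true else incFail
    let decFail := if ¬(1 ≤ -d ∧ -d < 4) then true else decFail
    if incFail && decFail then false else dLoop rest incFail decFail

theorem isSafeRowLoop_eq_dLoop (row : List Int) (k : Nat) (m : Nat)
    (hm : m = row.length - (k + 1)) (incF decF : Bool) :
    isSafeRowLoop row (PySem.List.pyRange ((k : Int) + 1) (row.length : Int) 1) incF decF
      = dLoop (List.zipWith (fun a b => b - a) (row.drop k) (row.drop (k + 1))) incF decF := by
  induction m generalizing k incF decF with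
  | zero =>
    have hk : row.length ≤ k + 1 := by omega
    rw [PySem.List.pyRange_one_eq_nil (by exact_mod_cast hk)]
    have : row.drop (k + 1) = [] := List.drop_eq_nil_of_le hk
    simp [this, isSafeRowLoop, dLoop]
  | succ n ih =>
    have hk : k + 1 < row.length := by omega
    have hk0 : k < row.length := by omega
    rw [PySem.List.pyRange_one_cons (by exact_mod_cast hk)]
    have h1 : PySem.List.pyGetD row ((k : Int) + 1) 0 = row[k + 1] := by
      rw [PySem.List.pyGetD_eq_getElem row 0 (by omega) (by exact_mod_cast hk)]
      congr 1
    have h2 : PySem.List.pyGetD row ((k : Int) + 1 - 1) 0 = row[k] := by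
      rw [PySem.List.pyGetD_eq_getElem row 0 (by omega) (by omega)]
      congr 1
      omega
    have hneg : row[k] - row[k + 1] = -(row[k + 1] - row[k]) := by ring
    have harith : ((k : Int) + 1 + 1) = ((k + 1 : Nat) : Int) + 1 := by push_cast; ring
    have hzip : List.zipWith (fun a b => b - a) (row.drop k) (row.drop (k + 1))
        = (row[k + 1] - row[k]) :: List.zipWith (fun a b => b - a) (row.drop (k + 1)) (row.drop (k + 1 + 1)) := by
      rw [List.drop_eq_getElem_cons hk0, List.drop_eq_getElem_cons hk, List.zipWith_cons_cons]
    rw [hzip]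
    simp only [isSafeRowLoop, dLoop, h1, h2, hneg, harith]
    split_ifs <;> first | rfl | exact ih (k + 1) (by omega) _ _

theorem dLoop_char (ds : List Int) (incF decF : Bool) :
    dLoop ds incF decF
      = (decide (ds = []) ||
         (!(incF || ds.any (fun d => !decide (1 ≤ d ∧ d < 4))) ||
          !(decF || ds.any (fun d => !decide (1 ≤ -d ∧ -d < 4))))) := by
  induction ds generalizing incF decF with
  | nil => simp [dLoop]
  | cons d ds ih =>
    simp only [dLoop, ih]
    cases ds <;> by_cases h1 : 1 ≤ d ∧ d < 4 <;> by_cases h2 : 1 ≤ -d ∧ -d < 4 <;>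
      cases incF <;> cases decF <;> simp_all

-- B's loop checks exactly "every adjacent difference d in prev::xs satisfies 1 ≤ sign*d ≤ 3"
theorem altLoop_char (sign : Int) (xs : List Int) (prev : Int) :
    altLoop sign prev xs
      = (List.zipWith (fun a b => b - a) (prev :: xs) xs).all
          (fun d => decide (1 ≤ sign * d ∧ sign * d ≤ 3)) := by
  induction xs generalizing prev with
  | nil => simp [altLoop]
  | cons x rest ih =>
    simp only [altLoop, List.zipWith_cons_cons, List.all_cons, ih x]
    by_cases h : 1 ≤ sign * (x - prev) ∧ sign * (x - prev) ≤ 3 <;> simp [h]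

-- ===== VERDICT (by name: the statement is the Claim_ definition above) =====
theorem isSafeRow_spec : Claim_equal_isSafeRow := by
  intro row _
  show isSafeRow row = isSafeRow_alt row
  unfold isSafeRow isSafeRow_alt
  have h := isSafeRowLoop_eq_dLoop row 0 (row.length - 1) (by omega) false false
  norm_num at h
  rw [h, dLoop_char]
  match row with
  | [] => simp
  | [a] => simp
  | a :: b :: rest =>
    have hlen : ¬((a :: b :: rest).length < 2) := by simp
    rw [dif_neg hlen]
    have hga : PySem.List.pyGetD (a :: b :: rest) 0 0 = a := PySem.List.pyGetD_zero_cons a _ 0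
    have hgb : PySem.List.pyGetD (a :: b :: rest) 1 0 = b := by
      rw [PySem.List.pyGetD_eq_getElem _ 0 (by omega) (by simp)]; rfl
    simp only [hga, hgb, List.drop_one, List.tail_cons]
    rw [altLoop_char]
    simp only [List.zipWith_cons_cons, List.all_cons, List.any_cons]
    by_cases hab : a < b
    · -- sign = 1: the decreasing branch fails on the first difference b - a ≥ 1
      rw [if_pos hab]
      have hdec : (1 ≤ -(b - a) ∧ -(b - a) < 4) = False := by
        simp only [eq_iff_iff, iff_false]; omega
      have e1 : ∀ d : Int, decide (1 ≤ (1:Int) * d ∧ 1 * d ≤ 3) = decide (1 ≤ d ∧ d < 4) := by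
        intro d; rw [decide_eq_decide]; constructor <;> rintro ⟨h1, h2⟩ <;> exact ⟨by omega, by omega⟩
      simp only [hdec, e1]
      simp [List.all_eq_not_any_not, Bool.not_or, Bool.not_and]
    · -- sign = -1: the increasing branch fails on the first difference b - a ≤ 0
      rw [if_neg hab]
      have hinc : (1 ≤ b - a ∧ b - a < 4) = False := by
        simp only [eq_iff_iff, iff_false]; omega
      have e2 : ∀ d : Int, decide (1 ≤ (-1:Int) * d ∧ -1 * d ≤ 3) = decide (1 ≤ -d ∧ -d < 4) := by
        intro d; rw [decide_eq_decide]; constructor <;> rintro ⟨h1, h2⟩ <;> exact ⟨by omega, by omega⟩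
      simp only [hinc, e2]
      simp [List.all_eq_not_any_not, Bool.not_or, Bool.not_and]
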